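-- pv_equiv track=rewrite | github.com/bingdongni/NeuroMinecraftGenesis-NMG- | worlds/real/strategy_transfer.py | _classify_strategy_type
-- ===== SOURCE A (Python) =====
-- from typing import Dict, List, Any, Tuple, Optional
--
-- def _classify_strategy_type(action_sequences: List[Dict[str, Any]]) -> str:
--     """分类策略类型"""
--     # 基于动作序列分析策略类型
--     if not action_sequences:
--         return 'unknown'
--
--     # 简单的策略类型分类逻辑
--     grab_actions = sum(1 for seq in action_sequences if seq.get('action_type') == 'grab')
--     place_actions = sum(1 for seq in action_sequences if seq.get('action_type') == 'place')
--
--     if grab_actions > place_actions: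
--         return 'grab_and_move'
--     elif place_actions > grab_actions:
--         return 'placement_strategy'
--     else:
--         return 'mixed_strategy'
-- ===== SOURCE B (Python) =====
-- from typing import Dict, List, Any
--
-- def _classify_strategy_type(action_sequences: List[Dict[str, Any]]) -> str:
--     """分类策略类型 — single-pass signed balance (grab +1, place -1), classify by sign.
--
--     Correct because A's three-way comparison of grab vs place counts depends
--     only on their difference, which this running balance computes directly."""
--     if not action_sequences:
--         return 'unknown'
--     balance = 0
--     for seq in action_sequences:
--         t = seq.get('action_type')
--         if t == 'grab':
--             balance += 1
--         elif t == 'place':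
--             balance -= 1
--     if balance > 0:
--         return 'grab_and_move'
--     if balance < 0:
--         return 'placement_strategy'
--     return 'mixed_strategy'
-- ===== Notes on version B (the rewrite author's own statement) =====
-- stated objective: alternative
-- what changed: Replaces the two per-type counting scans and count comparison with one fold maintaining a single signed balance (+1 for grab, -1 for place) whose sign decides the class; no counts are ever materialised.
import Mathlib
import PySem

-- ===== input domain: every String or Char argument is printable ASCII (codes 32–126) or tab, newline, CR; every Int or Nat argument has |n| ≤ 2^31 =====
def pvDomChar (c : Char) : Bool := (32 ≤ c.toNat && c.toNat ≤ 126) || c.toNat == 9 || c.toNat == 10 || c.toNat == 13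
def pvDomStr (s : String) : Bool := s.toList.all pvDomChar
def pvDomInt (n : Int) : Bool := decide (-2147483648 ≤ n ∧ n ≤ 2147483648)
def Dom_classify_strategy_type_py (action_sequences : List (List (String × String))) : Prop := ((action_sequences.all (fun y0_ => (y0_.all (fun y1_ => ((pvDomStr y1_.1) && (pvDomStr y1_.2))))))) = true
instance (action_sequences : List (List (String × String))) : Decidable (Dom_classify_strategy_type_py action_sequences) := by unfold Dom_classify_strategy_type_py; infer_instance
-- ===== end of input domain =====

-- B replaces A's two per-type counting scans with one fold keeping a signed balance (+1 grab, -1 place) and classifies by its sign (alternative decomposition, not claimed faster).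

-- ===== PORT A =====
def classify_strategy_type_py (action_sequences : List (List (String × String))) : String :=
  if action_sequences = [] then "unknown"
  else
    let grab_actions : Int :=
      (action_sequences.map (fun seq =>
        if PySem.Dict.get? (PySem.Dict.mk seq) "action_type" == some "grab" then (1 : Int) else 0)).sum
    let place_actions : Int :=
      (action_sequences.map (fun seq =>
        if PySem.Dict.get? (PySem.Dict.mk seq) "action_type" == some "place" then (1 : Int) else 0)).sum
    if grab_actions > place_actions then "grab_and_move"
    else if place_actions > grab_actions then "placement_strategy"
    else "mixed_strategy"

-- ===== PORT B =====
def classify_strategy_type_py_alt (action_sequences : List (List (String × String))) : String :=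
  if action_sequences = [] then "unknown"
  else
    let balance : Int := action_sequences.foldl (fun b seq =>
      let t := PySem.Dict.get? (PySem.Dict.mk seq) "action_type"
      if t == some "grab" then b + 1
      else if t == some "place" then b - 1
      else b) 0
    if balance > 0 then "grab_and_move"
    else if balance < 0 then "placement_strategy"
    else "mixed_strategy"

-- ===== PRECONDITION & SPEC =====
def Spec_classify_strategy_type_py (action_sequences : List (List (String × String))) (out : String) : Prop := out = classify_strategy_type_py_alt action_sequences
instance (action_sequences : List (List (String × String))) (out : String) : Decidable (Spec_classify_strategy_type_py action_sequences out) := by unfold Spec_classify_strategy_type_py; infer_instance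

-- ===== CLAIM (what is proved, stated in full; the proofs are below) =====
def Claim_equal_classify_strategy_type_py : Prop := ∀ (action_sequences : List (List (String × String))), Dom_classify_strategy_type_py action_sequences → Spec_classify_strategy_type_py action_sequences (classify_strategy_type_py action_sequences)

-- ===== LEMMAS AND PROOFS =====

-- ===== VERDICT (by name: the statement is the Claim_ definition above) =====
-- The fold's balance equals (grab count) - (place count), for any start value.
theorem balance_eq (xs : List (List (String × String))) (b : Int) :
    xs.foldl (fun b seq =>
      let t := PySem.Dict.get? (PySem.Dict.mk seq) "action_type"
      if t == some "grab" then b + 1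
      else if t == some "place" then b - 1
      else b) b
    = b + (xs.map (fun seq =>
        if PySem.Dict.get? (PySem.Dict.mk seq) "action_type" == some "grab" then (1 : Int) else 0)).sum
        - (xs.map (fun seq =>
        if PySem.Dict.get? (PySem.Dict.mk seq) "action_type" == some "place" then (1 : Int) else 0)).sum := by
  induction xs generalizing b with
  | nil => simp
  | cons hd tl ih =>
    simp only [List.foldl_cons, List.map_cons, List.sum_cons, ih]
    split_ifs <;> simp_all <;> omega

-- ===== VERDICT (by name: the statement is the Claim_ definition above) =====
theorem classify_strategy_type_py_spec : Claim_equal_classify_strategy_type_py := by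
  intro xs _
  unfold Spec_classify_strategy_type_py classify_strategy_type_py classify_strategy_type_py_alt
  by_cases h : xs = []
  · simp [h]
  · simp only [if_neg h, balance_eq]
    split_ifs <;> first | rfl | omega
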